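-- pv_equiv track=rewrite | github.com/konstantinosBlatsoukasRepo/everybody_codes_2024 | quest2/part2.py | count_runic_symbols
-- ===== SOURCE A (Python) =====
-- def count_runic_symbols(words, inscription_word):
--     count = set()
--     for word in words:
--         for i, val in enumerate(inscription_word):
--             if i + len(word) > len(inscription_word):
--                 break
--             if inscription_word[i : i + len(word)] == word:
--                 count |= set(range(i, i + len(word)))
--
--     return len(count)
-- ===== SOURCE B (Python) =====
-- def count_runic_symbols(words, inscription_word):
--     n = len(inscription_word)
--     total = 0
--     for j in range(n):
--         covered = any(
--             inscription_word[i:i + len(w)] == w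
--             for w in words
--             for i in range(max(0, j - len(w) + 1), j + 1)
--         )
--         if covered:
--             total += 1
--     return total
-- ===== Notes on version B (the rewrite author's own statement) =====
-- stated objective: alternative
-- what changed: B drops A's global set of covered indices: it makes one pass over the positions of the inscription and counts each position j directly if some word occurrence covers it (an any over words and candidate start offsets), so no set is built or unioned.
import Mathlib
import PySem

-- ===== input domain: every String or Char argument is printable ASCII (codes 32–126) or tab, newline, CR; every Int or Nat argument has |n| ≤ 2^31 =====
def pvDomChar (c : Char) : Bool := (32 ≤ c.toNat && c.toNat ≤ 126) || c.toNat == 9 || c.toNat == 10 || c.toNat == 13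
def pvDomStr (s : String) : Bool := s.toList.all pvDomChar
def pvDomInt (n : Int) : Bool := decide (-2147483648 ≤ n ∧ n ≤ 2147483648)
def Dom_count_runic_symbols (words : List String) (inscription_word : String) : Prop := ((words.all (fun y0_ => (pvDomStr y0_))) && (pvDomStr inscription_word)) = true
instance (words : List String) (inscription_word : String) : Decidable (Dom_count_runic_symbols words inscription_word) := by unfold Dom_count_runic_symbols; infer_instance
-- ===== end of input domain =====

-- B replaces A's accumulated set of covered indices by a direct per-position count: alternative decomposition, no speed claim.

-- ===== PORT A =====
-- inner 'for i, val in enumerate(inscription_word): …' with its break, for one word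
def pvLoopA (w ins : List Char) : Nat → List Char → PySem.Set Int → PySem.Set Int
  | _, [], s => s
  | i, _ :: rest, s =>
    if ins.length < i + w.length then s
    else pvLoopA w ins (i + 1) rest
      (if PySem.List.slice ins (some (i : Int)) (some ((i : Int) + (w.length : Int))) == w
       then PySem.Set.union s (PySem.List.pyRange (i : Int) ((i : Int) + (w.length : Int)) 1)
       else s)

def count_runic_symbols (words : List String) (inscription_word : String) : Int :=
  PySem.Set.len
    (words.foldl
      (fun s word => pvLoopA word.toList inscription_word.toList 0 inscription_word.toList s)
      PySem.Set.empty)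

-- ===== PORT B =====
-- 'any(inscription_word[i:i+len(w)] == w for w in words for i in range(max(0, j-len(w)+1), j+1))'
def pvCoveredB (words : List String) (ins : List Char) (j : Int) : Bool :=
  words.any (fun w =>
    (PySem.List.pyRange (max 0 (j - PySem.Str.len w + 1)) (j + 1) 1).any (fun i =>
      PySem.List.slice ins (some i) (some (i + PySem.Str.len w)) == w.toList))

def count_runic_symbols_alt (words : List String) (inscription_word : String) : Int :=
  (PySem.List.pyRange 0 (PySem.Str.len inscription_word) 1).foldl
    (fun total j =>
      if pvCoveredB words inscription_word.toList j then total + 1 else total) 0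

-- ===== PRECONDITION & SPEC =====
def Spec_count_runic_symbols (words : List String) (inscription_word : String) (out : Int) : Prop := out = count_runic_symbols_alt words inscription_word
instance (words : List String) (inscription_word : String) (out : Int) : Decidable (Spec_count_runic_symbols words inscription_word out) := by unfold Spec_count_runic_symbols; infer_instance

-- ===== CLAIM (what is proved, stated in full; the proofs are below) =====
def Claim_equal_count_runic_symbols : Prop := ∀ (words : List String) (inscription_word : String), Dom_count_runic_symbols words inscription_word → Spec_count_runic_symbols words inscription_word (count_runic_symbols words inscription_word)

-- ===== LEMMAS AND PROOFS =====

-- index x is covered by an occurrence of some word of `words` in `ins`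
def pvCov (words : List String) (ins : List Char) (x : Int) : Prop :=
  ∃ w ∈ words, ∃ k : Nat,
    (ins.drop k).take w.toList.length = w.toList ∧ (k : Int) ≤ x ∧ x < (k : Int) + w.toList.length

lemma pvMatch_bound {w ins : List Char} {k : Nat}
    (hm : (ins.drop k).take w.length = w) : k + w.length ≤ ins.length ∨ w.length = 0 := by
  have hlen : ((ins.drop k).take w.length).length = w.length := by rw [hm]
  simp only [List.length_take, List.length_drop] at hlen
  omega

lemma pvLoopA_mem (w ins : List Char) (x : Int) :
    ∀ (rest : List Char) (i : Nat) (s : PySem.Set Int), rest = ins.drop i →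
      (x ∈ pvLoopA w ins i rest s ↔
        x ∈ s ∨ ∃ k : Nat, i ≤ k ∧ (ins.drop k).take w.length = w ∧ (k : Int) ≤ x ∧ x < (k : Int) + w.length) := by
  intro rest
  induction rest with
  | nil =>
      intro i s hrest
      simp only [pvLoopA]
      constructor
      · exact Or.inl
      · rintro (h | ⟨k, hik, hm, hkx, hxk⟩)
        · exact h
        · exfalso
          have hlen : ins.length ≤ i := by
            by_contra hc
            have := List.drop_eq_nil_iff.mp hrest.symm
            omega
          rcases pvMatch_bound hm with hb | hb <;> omega
  | cons c t ih =>
      intro i s hrest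
      have hi : i < ins.length := by
        by_contra hc
        rw [List.drop_eq_nil_of_le (by omega)] at hrest
        exact (List.cons_ne_nil c t) hrest |>.elim
      have ht : t = ins.drop (i + 1) := by
        rw [← List.tail_drop, ← hrest]
        rfl
      simp only [pvLoopA]
      split
      · rename_i hbr
        constructor
        · exact Or.inl
        · rintro (h | ⟨k, hik, hm, hkx, hxk⟩)
          · exact h
          · exfalso
            rcases pvMatch_bound hm with hb | hb <;> omega
      · rename_i hbr
        rw [ih (i + 1) _ ht]
        have hslice : PySem.List.slice ins (some (i : Int)) (some ((i : Int) + (w.length : Int))) = (ins.drop i).take w.length :=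
          PySem.List.slice_natCast_add ins i w.length
        by_cases hm : (ins.drop i).take w.length = w
        · have hcond : (PySem.List.slice ins (some (i : Int)) (some ((i : Int) + (w.length : Int))) == w) = true := by
            rw [hslice, hm]; simp
          rw [hcond]
          simp only [if_true, PySem.Set.mem_union, PySem.List.mem_pyRange_one]
          constructor
          · rintro ((h | hr) | ⟨k, hik, hmk, hkx, hxk⟩)
            · exact Or.inl h
            · exact Or.inr ⟨i, le_refl i, hm, hr.1, hr.2⟩
            · exact Or.inr ⟨k, by omega, hmk, hkx, hxk⟩
          · rintro (h | ⟨k, hik, hmk, hkx, hxk⟩)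
            · exact Or.inl (Or.inl h)
            · rcases Nat.eq_or_lt_of_le hik with heq | hlt
              · subst heq; exact Or.inl (Or.inr ⟨hkx, hxk⟩)
              · exact Or.inr ⟨k, by omega, hmk, hkx, hxk⟩
        · have hcond : (PySem.List.slice ins (some (i : Int)) (some ((i : Int) + (w.length : Int))) == w) = false := by
            rw [hslice]
            exact beq_eq_false_iff_ne.mpr hm
          rw [hcond]
          simp only [Bool.false_eq_true, if_false]
          constructor
          · rintro (h | ⟨k, hik, hmk, hkx, hxk⟩)
            · exact Or.inl h
            · exact Or.inr ⟨k, by omega, hmk, hkx, hxk⟩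
          · rintro (h | ⟨k, hik, hmk, hkx, hxk⟩)
            · exact Or.inl h
            · rcases Nat.eq_or_lt_of_le hik with heq | hlt
              · subst heq; exact absurd hmk hm
              · exact Or.inr ⟨k, by omega, hmk, hkx, hxk⟩

lemma pvLoopA_nodup (w ins : List Char) :
    ∀ (i : Nat) (rest : List Char) (s : PySem.Set Int), s.Nodup → (pvLoopA w ins i rest s).Nodup := by
  intro i rest
  induction rest generalizing i with
  | nil => intro s hs; simpa [pvLoopA] using hs
  | cons c t ih =>
      intro s hs
      simp only [pvLoopA]
      split
      · exact hs
      · apply ih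
        split
        · exact PySem.Set.nodup_union _ _ hs
        · exact hs

lemma pvFold_nodup (words : List String) (ins : List Char) :
    ∀ (s : PySem.Set Int), s.Nodup →
      (words.foldl (fun s word => pvLoopA word.toList ins 0 ins s) s).Nodup := by
  intro s hs
  induction words generalizing s with
  | nil => simpa using hs
  | cons w ws ih => exact ih _ (pvLoopA_nodup _ _ _ _ _ hs)

lemma pvFold_mem (words : List String) (ins : List Char) (x : Int) :
    ∀ (s : PySem.Set Int),
      (x ∈ words.foldl (fun s word => pvLoopA word.toList ins 0 ins s) s ↔
        x ∈ s ∨ pvCov words ins x) := by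
  induction words with
  | nil => intro s; simp [pvCov]
  | cons w ws ih =>
      intro s
      simp only [List.foldl_cons]
      rw [ih]
      rw [pvLoopA_mem w.toList ins x ins 0 s (by simp)]
      unfold pvCov
      constructor
      · rintro ((h | ⟨k, _, hm, hkx, hxk⟩) | ⟨w', hw', hk⟩)
        · exact Or.inl h
        · exact Or.inr ⟨w, List.mem_cons_self, k, hm, hkx, hxk⟩
        · exact Or.inr ⟨w', List.mem_cons_of_mem _ hw', hk⟩
      · rintro (h | ⟨w', hw', k, hm, hkx, hxk⟩)
        · exact Or.inl (Or.inl h)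
        · rcases List.mem_cons.mp hw' with rfl | hmem
          · exact Or.inl (Or.inr ⟨k, Nat.zero_le k, hm, hkx, hxk⟩)
          · exact Or.inr ⟨w', hmem, k, hm, hkx, hxk⟩

lemma pvCoveredB_iff (words : List String) (ins : List Char) (j : Int) :
    pvCoveredB words ins j = true ↔ pvCov words ins j := by
  unfold pvCoveredB pvCov
  simp only [List.any_eq_true, PySem.List.mem_pyRange_one, beq_iff_eq, PySem.Str.len]
  constructor
  · rintro ⟨w, hw, i, ⟨hlo, hhi⟩, hs⟩
    have h0 : 0 ≤ i := le_trans (le_max_left _ _) hlo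
    obtain ⟨k, rfl⟩ := Int.eq_ofNat_of_zero_le h0
    rw [PySem.List.slice_natCast_add] at hs
    rw [max_le_iff] at hlo
    exact ⟨w, hw, k, hs, by omega, by omega⟩
  · rintro ⟨w, hw, k, hm, hkj, hjk⟩
    refine ⟨w, hw, (k : Int), ⟨max_le_iff.mpr ⟨by omega, by omega⟩, by omega⟩, ?_⟩
    rw [PySem.List.slice_natCast_add]
    exact hm

lemma pvCov_bounds (words : List String) (ins : List Char) (x : Int)
    (h : pvCov words ins x) : 0 ≤ x ∧ x < ins.length := by
  obtain ⟨w, _, k, hm, hkx, hxk⟩ := h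
  have hlen : ((ins.drop k).take w.toList.length).length = w.toList.length := by rw [hm]
  simp only [List.length_take, List.length_drop] at hlen
  omega

-- ===== VERDICT (by name: the statement is the Claim_ definition above) =====
theorem count_runic_symbols_spec : Claim_equal_count_runic_symbols := by
  intro words ins _
  unfold Spec_count_runic_symbols count_runic_symbols count_runic_symbols_alt
  rw [PySem.List.foldl_if_add_one (pvCoveredB words ins.toList)]
  rw [List.countP_eq_length_filter]
  have hFnd : (words.foldl (fun s word => pvLoopA word.toList ins.toList 0 ins.toList s) PySem.Set.empty).Nodup :=
    pvFold_nodup words ins.toList PySem.Set.empty List.nodup_nil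
  have hfilnd : ((PySem.List.pyRange 0 (PySem.Str.len ins) 1).filter (pvCoveredB words ins.toList)).Nodup :=
    (PySem.List.nodup_pyRange_one 0 (PySem.Str.len ins)).filter _
  have hperm := (List.perm_ext_iff_of_nodup hFnd hfilnd).mpr ?_
  · simp only [PySem.Set.len, hperm.length_eq]
    omega
  · intro a
    rw [pvFold_mem words ins.toList a PySem.Set.empty]
    simp only [PySem.Set.empty, List.not_mem_nil, false_or]
    rw [List.mem_filter]
    rw [pvCoveredB_iff]
    constructor
    · intro h
      refine ⟨PySem.List.mem_pyRange_one.mpr ?_, h⟩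
      have := pvCov_bounds words ins.toList a h
      simp only [PySem.Str.len]
      omega
    · exact fun h => h.2
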